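-- pv_equiv track=rewrite | github.com/guilhermegouw/data-structures-and-algorithms | python/problems/binary_search/find_element_in_sorted_array_with_duplicates/challenge.py | find_element_in_sorted_array_with_duplicates
-- ===== SOURCE A (Python) =====
-- def find_element_in_sorted_array_with_duplicates(array, target):
--     position = -1
--     left = 0
--     right = len(array) - 1
--     while left <= right:
--         middle = (left + right) // 2
--         if array[middle] == target:
--             position = middle
--             right = middle - 1
--         elif array[middle] < target:
--             left = middle + 1
--         else:
--             right = middle - 1
--     return position
-- ===== SOURCE B (Python) =====
-- def find_element_in_sorted_array_with_duplicates(array, target):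
--     # simple left-to-right scan: the first match is by definition the leftmost
--     for i, val in enumerate(array):
--         if val == target:
--             return i
--     return -1
-- ===== Notes on version B (the rewrite author's own statement) =====
-- stated objective: simpler
-- what changed: Replaces A's binary search with a mutable position accumulator by a plain left-to-right scan returning the first index equal to target; Pre_ admits sorted (non-decreasing) arrays, the function's natural domain, plus arrays not containing the target (both return -1), excluding only unsorted arrays that contain the target, where A's probes yield an accidental index.
-- outside the precondition, e.g. on find_element_in_sorted_array_with_duplicates([2, 1], 1): A returns -1, B returns 1
import Mathlib
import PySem

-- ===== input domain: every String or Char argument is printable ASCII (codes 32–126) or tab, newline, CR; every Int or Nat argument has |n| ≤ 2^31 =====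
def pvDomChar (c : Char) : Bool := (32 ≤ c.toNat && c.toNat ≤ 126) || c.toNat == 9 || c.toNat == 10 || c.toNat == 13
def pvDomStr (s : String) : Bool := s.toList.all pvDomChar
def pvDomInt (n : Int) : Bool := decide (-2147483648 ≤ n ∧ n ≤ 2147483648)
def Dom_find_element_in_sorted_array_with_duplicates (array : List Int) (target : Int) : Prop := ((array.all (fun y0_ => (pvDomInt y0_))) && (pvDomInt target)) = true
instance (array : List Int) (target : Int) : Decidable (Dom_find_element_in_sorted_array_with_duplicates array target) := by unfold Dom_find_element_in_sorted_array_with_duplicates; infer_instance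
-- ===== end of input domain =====

-- B replaces A's binary search (mutable position accumulator, halving loop) by a
-- plain left-to-right scan returning the first index equal to target (simpler);
-- Pre_ restricts to sorted arrays, the function's natural domain, where both agree.

-- ===== PORT A =====
-- the while loop of A, state (position, left, right)
def pvALoop (array : List Int) (target : Int) (position left right : Int) : Int :=
  if _h : left ≤ right then
    let middle := PySem.Int.floordiv (left + right) 2
    match PySem.List.pyGet? array middle with
    | none => position  -- unreachable totality guard: 0 ≤ left ≤ middle ≤ right < len in every call A makes
    | some v =>
      if v = target then pvALoop array target middle left (middle - 1)
      else if v < target then pvALoop array target position (middle + 1) right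
      else pvALoop array target position left (middle - 1)
  else position
termination_by (right + 1 - left).toNat
decreasing_by
  all_goals
    have := PySem.Int.floordiv_two_mid_bounds _h
    omega

def find_element_in_sorted_array_with_duplicates (array : List Int) (target : Int) : Int :=
  pvALoop array target (-1) 0 ((array.length : Int) - 1)

-- ===== PORT B =====
-- B's 'for i, val in enumerate(array)' loop with its early return
def pvBScan (array : List Int) (target : Int) (i : Int) : Int :=
  match array with
  | [] => -1
  | v :: rest => if v = target then i else pvBScan rest target (i + 1)

def find_element_in_sorted_array_with_duplicates_alt (array : List Int) (target : Int) : Int :=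
  pvBScan array target 0

-- ===== PRECONDITION & SPEC =====
-- Pre_ admits sorted (non-decreasing) arrays — the function's natural domain, its
-- name states so — and also any array not containing the target (both programs
-- return -1 there); it excludes only unsorted arrays containing the target, where
-- A's binary-search probes on invalid input yield an accidental index.
def Pre_find_element_in_sorted_array_with_duplicates (array : List Int) (target : Int) : Prop :=
  List.Pairwise (· ≤ ·) array ∨ target ∉ array
instance (array : List Int) (target : Int) : Decidable (Pre_find_element_in_sorted_array_with_duplicates array target) := by unfold Pre_find_element_in_sorted_array_with_duplicates; infer_instance

def pvWitness_find_element_in_sorted_array_with_duplicates : List Int × Int := ([1, 2, 2, 3], 2)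

def Spec_find_element_in_sorted_array_with_duplicates (array : List Int) (target : Int) (out : Int) : Prop := out = find_element_in_sorted_array_with_duplicates_alt array target
instance (array : List Int) (target : Int) (out : Int) : Decidable (Spec_find_element_in_sorted_array_with_duplicates array target out) := by unfold Spec_find_element_in_sorted_array_with_duplicates; infer_instance

-- ===== CLAIM (what is proved, stated in full; the proofs are below) =====
def Claim_equal_find_element_in_sorted_array_with_duplicates : Prop := ∀ (array : List Int) (target : Int), Dom_find_element_in_sorted_array_with_duplicates array target → Pre_find_element_in_sorted_array_with_duplicates array target → Spec_find_element_in_sorted_array_with_duplicates array target (find_element_in_sorted_array_with_duplicates array target)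

-- ===== LEMMAS AND PROOFS =====

-- B's scan never finds anything when no element equals target
theorem pvBScan_none (array : List Int) (target : Int) (i : Int)
    (h : ∀ k (hk : k < array.length), array[k] ≠ target) :
    pvBScan array target i = -1 := by
  induction array generalizing i with
  | nil => rfl
  | cons v rest ih =>
    have hv : v ≠ target := h 0 (by simp)
    simp only [pvBScan, if_neg hv]
    exact ih _ fun k hk => h (k + 1) (by simpa using hk)

-- B's scan returns i + (index of the first occurrence)
theorem pvBScan_found (array : List Int) (target : Int) (i : Int)
    (p : Nat) (hp : p < array.length) (hpt : array[p] = target)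
    (hbefore : ∀ k (hk : k < array.length), k < p → array[k] ≠ target) :
    pvBScan array target i = i + p := by
  induction array generalizing i p with
  | nil => simp at hp
  | cons v rest ih =>
    cases p with
    | zero => simp_all [pvBScan]
    | succ q =>
      have hv : v ≠ target := hbefore 0 (by simp) (by omega)
      simp only [pvBScan, if_neg hv]
      have := ih (i + 1) q (by simpa using hp) (by simpa using hpt)
        (fun k hk hkq => hbefore (k + 1) (by simpa using hk) (by omega))
      rw [this]; push_cast; ring

-- when target occurs nowhere, A's loop never updates its accumulator
theorem pvALoop_notmem (array : List Int) (target : Int)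
    (hmem : target ∉ array) (position left right : Int) :
    pvALoop array target position left right = position := by
  by_cases h : left ≤ right
  · rw [pvALoop, dif_pos h]
    set m := PySem.Int.floordiv (left + right) 2 with hm
    rcases hget : PySem.List.pyGet? array m with _ | v <;> simp only [hget]
    have hv : v ≠ target := fun he =>
      hmem (he ▸ PySem.List.mem_of_pyGet?_eq_some array hget)
    have hvlt : v < target ∨ ¬ v < target := by omega
    simp only [if_neg hv]
    rcases hvlt with hlt | hlt
    · rw [if_pos hlt]; exact pvALoop_notmem array target hmem position (m + 1) right
    · rw [if_neg hlt]; exact pvALoop_notmem array target hmem position left (m - 1)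
  · rw [pvALoop, dif_neg h]
termination_by (right + 1 - left).toNat
decreasing_by
  all_goals
    have := PySem.Int.floordiv_two_mid_bounds h
    omega

-- A's loop, under its invariant on a sorted array, returns B's scan's value.
theorem pvALoop_eq_scan (array : List Int) (target : Int)
    (hs : ∀ a b (ha : a < array.length) (hb : b < array.length), a ≤ b → array[a] ≤ array[b])
    (position left right : Int)
    (hl : 0 ≤ left) (hr : right < (array.length : Int))
    (hlow : ∀ k (hk : k < array.length), (k : Int) < left → array[k] < target)
    (hpos : (position = -1 ∧ ∀ k (hk : k < array.length), right < (k : Int) → target < array[k]) ∨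
      (0 ≤ position ∧ right < position ∧ position < (array.length : Int) ∧
        array[position.toNat]? = some target ∧
        ∀ k (hk : k < array.length), right < (k : Int) → (k : Int) < position → target < array[k])) :
    pvALoop array target position left right = pvBScan array target 0 := by
  by_cases h : left ≤ right
  · rw [pvALoop, dif_pos h]
    have hmid := PySem.Int.floordiv_two_mid_bounds h
    set m := PySem.Int.floordiv (left + right) 2 with hm
    have hm0 : 0 ≤ m := le_trans hl hmid.1
    have hmlt : m < (array.length : Int) := by omega
    simp only [PySem.List.pyGet?_eq_some_getElem array hm0 hmlt]
    set v := array[m.toNat]'(by omega) with hv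
    by_cases he : v = target
    · have hne : ¬ v < target := by omega
      simp only [if_pos he]
      refine pvALoop_eq_scan array target hs m left (m - 1) hl (by omega) hlow
        (Or.inr ⟨hm0, by omega, hmlt, ?_, ?_⟩)
      · rw [List.getElem?_eq_getElem (show m.toNat < array.length by omega)]
        exact congrArg some he
      · intro k hk h1 h2; omega
    · simp only [if_neg he]
      by_cases hlt : v < target
      · simp only [if_pos hlt]
        refine pvALoop_eq_scan array target hs position (m + 1) right (by omega) hr ?_ hpos
        intro k hk hkm
        have : array[k] ≤ v := by
          rw [hv]; exact hs k m.toNat hk (by omega) (by omega)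
        omega
      · simp only [if_neg hlt]
        have hvt : target < v := by omega
        have hmv : ∀ k (hk : k < array.length), m - 1 < (k : Int) → (k : Int) ≤ right →
            target < array[k] := by
          intro k hk h1 h2
          have : v ≤ array[k] := by
            rw [hv]; exact hs m.toNat k (by omega) hk (by omega)
          omega
        refine pvALoop_eq_scan array target hs position left (m - 1) hl (by omega) hlow ?_
        rcases hpos with ⟨hp1, hp2⟩ | ⟨hp0, hp1, hp2, hp3, hp4⟩
        · refine Or.inl ⟨hp1, ?_⟩
          intro k hk h1
          by_cases hkr : (k : Int) ≤ right
          · exact hmv k hk h1 hkr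
          · exact hp2 k hk (by omega)
        · refine Or.inr ⟨hp0, by omega, hp2, hp3, ?_⟩
          intro k hk h1 h2
          by_cases hkr : (k : Int) ≤ right
          · exact hmv k hk h1 hkr
          · exact hp4 k hk (by omega) h2
  · rw [pvALoop, dif_neg h]
    rcases hpos with ⟨hp1, hp2⟩ | ⟨hp0, hp1, hp2, hp3, hp4⟩
    · rw [hp1, pvBScan_none]
      intro k hk
      by_cases hkl : (k : Int) < left
      · have := hlow k hk hkl; omega
      · have := hp2 k hk (by omega); omega
    · obtain ⟨hplt, hpeq⟩ := List.getElem?_eq_some_iff.mp hp3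
      have := pvBScan_found array target 0 position.toNat hplt hpeq ?_
      · rw [this]; omega
      · intro k hk hkp
        by_cases hkl : (k : Int) < left
        · have := hlow k hk hkl; omega
        · have := hp4 k hk (by omega) (by omega); omega
termination_by (right + 1 - left).toNat
decreasing_by
  all_goals
    have := PySem.Int.floordiv_two_mid_bounds h
    omega

-- ===== VERDICT (by name: the statement is the Claim_ definition above) =====
theorem find_element_in_sorted_array_with_duplicates_spec : Claim_equal_find_element_in_sorted_array_with_duplicates := by
  intro array target _hdom hpre
  unfold Spec_find_element_in_sorted_array_with_duplicates
  unfold find_element_in_sorted_array_with_duplicates find_element_in_sorted_array_with_duplicates_alt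
  rcases hpre with hpre | hmem
  case inr =>
    rw [pvALoop_notmem array target hmem, pvBScan_none]
    intro k hk he
    exact hmem (he ▸ array.getElem_mem hk)
  have hs : ∀ a b (ha : a < array.length) (hb : b < array.length), a ≤ b → array[a] ≤ array[b] := by
    intro a b ha hb hab
    rcases eq_or_lt_of_le hab with rfl | hlt
    · exact le_refl _
    · exact (List.pairwise_iff_getElem.mp hpre) a b ha hb hlt
  refine pvALoop_eq_scan array target hs (-1) 0 ((array.length : Int) - 1)
    le_rfl (by omega) (by intro k hk h1; omega) (Or.inl ⟨rfl, ?_⟩)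
  intro k hk h1; omega
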